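-- pv_equiv track=rewrite | github.com/shashankmishraa/BHIV-HR-Platform | services/gateway/app/advanced_endpoints_part2.py | determine_overall_health
-- ===== SOURCE A (Python) =====
-- from typing import Optional, List, Dict, Any
--
-- def determine_overall_health(alerts: List[Dict[str, Any]]) -> str:
--     """Determine overall system health based on alerts"""
--     active_critical = len([a for a in alerts if a.get("status") == "active" and a.get("severity") == "critical"])
--     active_high = len([a for a in alerts if a.get("status") == "active" and a.get("severity") == "high"])
--
--     if active_critical > 0:
--         return "critical"
--     elif active_high > 2:
--         return "degraded"
--     elif active_high > 0:
--         return "warning"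
--     else:
--         return "healthy"
-- ===== SOURCE B (Python) =====
-- def determine_overall_health(alerts):
--     """Determine overall system health based on alerts (single early-exiting pass)"""
--     high = 0
--     for a in alerts:
--         if a.get("status") != "active":
--             continue
--         sev = a.get("severity")
--         if sev == "critical":
--             return "critical"
--         if sev == "high":
--             high += 1
--     if high > 2:
--         return "degraded"
--     if high > 0:
--         return "warning"
--     return "healthy"
-- ===== Notes on version B (the rewrite author's own statement) =====
-- stated objective: alternative
-- what changed: Replaces the two list-building comprehensions with one early-exiting pass that returns 'critical' on the first active critical alert and otherwise counts active high alerts in an integer.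
import Mathlib
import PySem

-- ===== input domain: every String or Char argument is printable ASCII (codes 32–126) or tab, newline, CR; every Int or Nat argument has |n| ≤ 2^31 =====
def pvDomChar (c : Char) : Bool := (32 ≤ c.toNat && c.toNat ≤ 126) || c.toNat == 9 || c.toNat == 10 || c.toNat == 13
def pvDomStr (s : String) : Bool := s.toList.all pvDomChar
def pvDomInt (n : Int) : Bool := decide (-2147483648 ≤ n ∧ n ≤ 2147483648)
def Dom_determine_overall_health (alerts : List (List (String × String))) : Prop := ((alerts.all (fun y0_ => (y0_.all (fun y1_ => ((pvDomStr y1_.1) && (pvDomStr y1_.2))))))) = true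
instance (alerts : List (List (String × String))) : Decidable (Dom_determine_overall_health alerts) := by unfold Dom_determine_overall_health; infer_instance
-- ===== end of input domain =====

-- B replaces A's two list comprehensions with one early-exiting pass over the alerts (alternative decomposition, same cost).


-- ===== PORT A =====
-- a.get(k): dict lookup returning Option (None when absent)
def pvGetKey (a : List (String × String)) (k : String) : Option String :=
  (PySem.Dict.mk a).get? k

def determine_overall_health (alerts : List (List (String × String))) : String :=
  let active_critical : Int :=
    (alerts.filter (fun a => pvGetKey a "status" == some "active" && pvGetKey a "severity" == some "critical")).length
  let active_high : Int :=
    (alerts.filter (fun a => pvGetKey a "status" == some "active" && pvGetKey a "severity" == some "high")).length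
  if active_critical > 0 then "critical"
  else if active_high > 2 then "degraded"
  else if active_high > 0 then "warning"
  else "healthy"

-- ===== PORT B =====
-- single pass with an integer accumulator for active-high alerts; returns "critical" immediately
def dohGo : List (List (String × String)) → Int → String
  | [], high => if high > 2 then "degraded" else if high > 0 then "warning" else "healthy"
  | a :: rest, high =>
    if pvGetKey a "status" != some "active" then dohGo rest high
    else
      let sev := pvGetKey a "severity"
      if sev == some "critical" then "critical"
      else if sev == some "high" then dohGo rest (high + 1)
      else dohGo rest high

def determine_overall_health_alt (alerts : List (List (String × String))) : String :=
  dohGo alerts 0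

-- ===== PRECONDITION & SPEC =====
def Spec_determine_overall_health (alerts : List (List (String × String))) (out : String) : Prop := out = determine_overall_health_alt alerts
instance (alerts : List (List (String × String))) (out : String) : Decidable (Spec_determine_overall_health alerts out) := by unfold Spec_determine_overall_health; infer_instance

-- ===== CLAIM (what is proved, stated in full; the proofs are below) =====
def Claim_equal_determine_overall_health : Prop := ∀ (alerts : List (List (String × String))), Dom_determine_overall_health alerts → Spec_determine_overall_health alerts (determine_overall_health alerts)

-- ===== LEMMAS AND PROOFS =====
def critLen (alerts : List (List (String × String))) : Int :=
  (alerts.filter (fun a => pvGetKey a "status" == some "active" && pvGetKey a "severity" == some "critical")).length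

def hiLen (alerts : List (List (String × String))) : Int :=
  (alerts.filter (fun a => pvGetKey a "status" == some "active" && pvGetKey a "severity" == some "high")).length

def ladder (crit hi : Int) : String :=
  if crit > 0 then "critical" else if hi > 2 then "degraded" else if hi > 0 then "warning" else "healthy"

lemma critLen_nonneg (alerts : List (List (String × String))) : 0 ≤ critLen alerts := by
  unfold critLen; positivity

lemma dohGo_char (alerts : List (List (String × String))) (h : Int) :
    dohGo alerts h = ladder (critLen alerts) (hiLen alerts + h) := by
  induction alerts generalizing h with
  | nil => simp [dohGo, critLen, hiLen, ladder]
  | cons a rest ih =>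
    by_cases hs : pvGetKey a "status" = some "active"
    · by_cases hc : pvGetKey a "severity" = some "critical"
      · have h1 : critLen (a :: rest) = critLen rest + 1 := by
          simp [critLen, hs, hc]
        have h0 : 0 < critLen (a :: rest) := by
          have := critLen_nonneg rest; omega
        rw [h1] at h0 ⊢
        simp only [dohGo, hs, hc]
        simp only [ladder, if_pos h0]
        simp
      · have h1 : critLen (a :: rest) = critLen rest := by
          simp [critLen, hc]
        by_cases hh : pvGetKey a "severity" = some "high"
        · have h2 : hiLen (a :: rest) = hiLen rest + 1 := by
            simp [hiLen, hs, hh]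
          simp only [dohGo, hs, hh]
          simp only [beq_self_eq_true, bne_self_eq_false, Bool.false_eq_true, if_false,
            beq_iff_eq, if_true, ih, h1, h2]
          have e : hiLen rest + (h + 1) = hiLen rest + 1 + h := by ring
          rw [e]
          simp
        · have h2 : hiLen (a :: rest) = hiLen rest := by
            simp [hiLen, hh]
          simp only [dohGo, hs]
          simp only [bne_self_eq_false, Bool.false_eq_true, if_false,
            beq_iff_eq, hc, hh, ih, h1, h2]
    · have h1 : critLen (a :: rest) = critLen rest := by
        simp [critLen, hs]
      have h2 : hiLen (a :: rest) = hiLen rest := by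
        simp [hiLen, hs]
      have hs' : (pvGetKey a "status" == some "active") = false := by simpa using hs
      simp only [dohGo, hs', bne, Bool.not_false, if_true, ih, h1, h2]

-- ===== VERDICT (by name: the statement is the Claim_ definition above) =====
theorem determine_overall_health_spec : Claim_equal_determine_overall_health := by
  intro alerts _
  unfold Spec_determine_overall_health determine_overall_health determine_overall_health_alt
  rw [dohGo_char]
  simp [ladder, critLen, hiLen]
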